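-- pv_equiv track=rewrite | github.com/piruty/atcoder | atcoder_beginner_contest/abc_ddd.py | execute
-- ===== SOURCE A (Python) =====
-- def execute(A):
--     ac = len(set(A))
--     aset = set(A)
--     if len(aset) == 1:
--         return 1
--     if len(aset) == 2:
--         return 2
--     result = 1000000
--     for i, a in enumerate(A):
--         # 探索済みの島は除外
--         A_dash = A[i:]
--         # 必要な島の数以下になったらbreak
--         if len(A_dash) < ac:
--             break
--         # 必要な島が含まれなくなったらbreak
--         is_all_loc = [aseti in A_dash for aseti in aset]
--         if False in is_all_loc:
--             break
--         days = 0
--         # すべての島に行くための最長を計算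
--         for aseti in aset:
--             if days < A_dash.index(aseti):
--                 days = A_dash.index(aseti)
--         if days < result:
--             result = days
--     return result + 1
-- ===== SOURCE B (Python) =====
-- def execute(A):
--     # One right-to-left pass: nxt[v] = index of the nearest occurrence of v at
--     # or after i.  Once nxt covers every distinct value, the shortest window
--     # starting at i spans max(nxt.values()) - i; keep the minimum span.
--     need = len(set(A))
--     INF = 1000000
--     best = INF
--     nxt = {}
--     for i in range(len(A) - 1, -1, -1):
--         nxt[A[i]] = i
--         if len(nxt) == need:
--             best = min(best, max(nxt.values()) - i)
--     return best + 1
-- ===== Notes on version B (the rewrite author's own statement) =====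
-- stated objective: faster
-- what changed: Replaces the per-start suffix slicing with membership checks and repeated list.index scans by a single right-to-left pass that maintains a next-occurrence dictionary, so the span of the window starting at each index is read off the dict instead of rescanned.
import Mathlib
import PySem

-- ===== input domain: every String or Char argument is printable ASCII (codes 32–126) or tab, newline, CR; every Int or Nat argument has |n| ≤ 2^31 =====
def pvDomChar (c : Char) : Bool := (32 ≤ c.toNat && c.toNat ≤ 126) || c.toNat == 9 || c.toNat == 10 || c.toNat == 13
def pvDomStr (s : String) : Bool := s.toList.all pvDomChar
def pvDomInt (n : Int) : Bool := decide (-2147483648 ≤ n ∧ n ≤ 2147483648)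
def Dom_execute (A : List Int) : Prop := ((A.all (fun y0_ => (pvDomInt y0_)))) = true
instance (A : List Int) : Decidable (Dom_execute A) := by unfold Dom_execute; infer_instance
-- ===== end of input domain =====

-- B replaces A's per-start suffix slicing and repeated list.index scans by one
-- right-to-left pass over a next-occurrence dictionary (objective: faster).

-- ===== PORT A =====
-- the 'for i, a in enumerate(A)' loop; a 'break' returns the accumulated result.
-- Python's A_dash.index(aseti) is guarded by the containment check, so the
-- index? lookup always succeeds here; '.getD 0' only totalises it.
def executeLoopA (A : List Int) (ac : Int) (aset : List Int) :
    List (Int × Int) → Int → Int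
  | [], result => result
  | (i, _a) :: rest, result =>
    let A_dash := PySem.List.slice A (some i) none
    if (A_dash.length : Int) < ac then result
    else if (aset.map (fun aseti => A_dash.contains aseti)).contains false then result
    else
      let days := aset.foldl
        (fun days aseti =>
          if days < (((PySem.List.index? A_dash aseti).getD 0 : Nat) : Int) then
            (((PySem.List.index? A_dash aseti).getD 0 : Nat) : Int)
          else days) 0
      executeLoopA A ac aset rest (if days < result then days else result)

def execute (A : List Int) : Int :=
  let ac : Int := ((PySem.Set.ofList A).length : Int)
  let aset : PySem.Set Int := PySem.Set.ofList A
  if aset.length = 1 then 1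
  else if aset.length = 2 then 2
  else executeLoopA A ac aset (PySem.List.enumerate A 0) 1000000 + 1

-- ===== PORT B =====
-- loop body of Source B: nxt[A[i]] = i; if len(nxt) == need: best = min(best, max(nxt.values()) - i).
-- i is always a valid index here, so pyGetD/getD 0 only totalise A[i] and max().
def stepB (A : List Int) (need : Nat) (st : PySem.Dict Int Int × Int) (i : Int) :
    PySem.Dict Int Int × Int :=
  let nxt := st.1.insert (PySem.List.pyGetD A i 0) i
  if nxt.size = need then
    (nxt, min st.2 ((PySem.List.max? nxt.values (fun y => y)).getD 0 - i))
  else (nxt, st.2)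

def execute_alt (A : List Int) : Int :=
  let need := (PySem.Set.ofList A).length
  let st := (PySem.List.pyRange ((A.length : Int) - 1) (-1) (-1)).foldl
    (stepB A need) (PySem.Dict.empty, 1000000)
  st.2 + 1

-- ===== PRECONDITION & SPEC =====
def Spec_execute (A : List Int) (out : Int) : Prop := out = execute_alt A
instance (A : List Int) (out : Int) : Decidable (Spec_execute A out) := by unfold Spec_execute; infer_instance

-- ===== CLAIM (what is proved, stated in full; the proofs are below) =====
def Claim_equal_execute : Prop := ∀ (A : List Int), Dom_execute A → Spec_execute A (execute A)

-- ===== LEMMAS AND PROOFS =====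

-- does A.drop k still contain every distinct value of A?
def coversB (A : List Int) (k : Nat) : Bool :=
  (PySem.Set.ofList A).all (fun v => (A.drop k).contains v)

-- first index of v in A.drop k (as Python's A[k:].index(v), totalised by 0)
def idxI (A : List Int) (k : Nat) (v : Int) : Int :=
  (((PySem.List.index? (A.drop k) v).getD 0 : Nat) : Int)

-- A's inner 'days' loop over the distinct values, for start index k
def spreadA (A : List Int) (k : Nat) : Int :=
  (PySem.Set.ofList A).foldl
    (fun days v => if days < idxI A k v then idxI A k v else days) 0

-- the candidate window spreads, one per covering start index
def cands (A : List Int) : List Int :=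
  ((List.range A.length).filter (coversB A)).map (spreadA A)

-- B's state after processing indices k, k+1, …, n-1 (right-to-left)
def stB (A : List Int) (need : Nat) (k : Nat) : PySem.Dict Int Int × Int :=
  if _h : k < A.length then stepB A need (stB A need (k+1)) (k : Int)
  else (PySem.Dict.empty, 1000000)
termination_by A.length - k

lemma coversB_iff (A : List Int) (k : Nat) :
    coversB A k = true ↔ ∀ v ∈ PySem.Set.ofList A, v ∈ A.drop k := by
  simp [coversB]

lemma coversB_mono (A : List Int) {k j : Nat} (hkj : k ≤ j)
    (hj : coversB A j = true) : coversB A k = true := by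
  rw [coversB_iff] at *
  intro v hv
  have := hj v hv
  have hsub : A.drop j ⊆ A.drop k := by
    have : A.drop j = (A.drop k).drop (j - k) := by
      rw [List.drop_drop]; congr 1; omega
    rw [this]; exact List.drop_subset _ _
  exact hsub this

lemma covers_length (A : List Int) (k : Nat) (h : coversB A k = true) :
    (PySem.Set.ofList A).length ≤ (A.drop k).length := by
  rw [coversB_iff] at h
  exact ((PySem.Set.nodup_ofList A).subperm h).length_le

-- min-fold shuffling: fold with a pre-min equals min of the fold
lemma foldl_min_min (l : List Int) (i x : Int) :
    l.foldl min (min i x) = min (l.foldl min i) x := by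
  induction l generalizing i with
  | nil => rfl
  | cons y t ih =>
    simp only [List.foldl_cons]
    rw [show min (min i x) y = min (min i y) x by
      rcases le_total i x with h1 | h1 <;> rcases le_total i y with h2 | h2 <;>
        rcases le_total x y with h3 | h3 <;> simp [min_def] <;> omega]
    exact ih (min i y)

lemma spreadA_eq_foldmax (A : List Int) (k : Nat) :
    spreadA A k = ((PySem.Set.ofList A).map (idxI A k)).foldl max 0 := by
  rw [List.foldl_map]
  unfold spreadA
  apply PySem.List.foldl_congr_mem
  intro acc x _
  rcases lt_or_ge acc (idxI A k x) with h | h <;> simp [max_def] <;> omega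

lemma spreadA_le (A : List Int) (k : Nat) {v : Int}
    (hv : v ∈ PySem.Set.ofList A) : idxI A k v ≤ spreadA A k := by
  rw [spreadA_eq_foldmax]
  exact (PySem.List.le_foldl_max _ _).2 _ (List.mem_map_of_mem hv)

lemma spreadA_cases (A : List Int) (k : Nat) :
    spreadA A k = 0 ∨ ∃ v ∈ PySem.Set.ofList A, spreadA A k = idxI A k v := by
  rw [spreadA_eq_foldmax]
  rcases PySem.List.foldl_max_mem ((PySem.Set.ofList A).map (idxI A k)) 0 with h | h
  · exact Or.inl h
  · rcases List.mem_map.mp h with ⟨v, hv, hveq⟩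
    exact Or.inr ⟨v, hv, hveq.symm⟩

-- ---------- A side ----------

lemma if_lt_eq_min (a b : Int) : (if a < b then a else b) = min b a := by
  rcases lt_or_ge a b with h | h
  · rw [if_pos h, min_eq_right h.le]
  · rw [if_neg (by omega), min_eq_left h]

lemma contains_false_eq (l : List Int) (p : Int → Bool) :
    ((l.map p).contains false) = !(l.all p) := by
  cases hall : l.all p
  · rw [List.all_eq_false] at hall
    obtain ⟨x, hx, hpx⟩ := hall
    have hmem : false ∈ l.map p := List.mem_map.mpr ⟨x, hx, by simpa using hpx⟩
    simp [hmem]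
  · rw [List.all_eq_true] at hall
    have hnmem : false ∉ l.map p := by
      intro hmem
      rcases List.mem_map.mp hmem with ⟨x, hx, hpx⟩
      rw [hall x hx] at hpx
      simp at hpx
    simp [hnmem]

lemma contains_false_coversB (A : List Int) (k : Nat) :
    (((PySem.Set.ofList A).map fun v => (A.drop k).contains v).contains false)
      = !(coversB A k) :=
  contains_false_eq _ _

lemma loopA_eq (A : List Int) (k : Nat) (res : Int) :
    executeLoopA A ((PySem.Set.ofList A).length : Int) (PySem.Set.ofList A)
      (PySem.List.enumerate (A.drop k) (k : Int)) res
    = (((List.range' k (A.length - k)).filter (coversB A)).map (spreadA A)).foldl min res := by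
  induction hm : A.length - k generalizing k res with
  | zero =>
    rw [List.drop_eq_nil_of_le (by omega), PySem.List.enumerate_nil]
    rfl
  | succ m ih =>
    have h : k < A.length := by omega
    rw [show PySem.List.enumerate (A.drop k) (k : Int)
          = ((k : Int), A[k]) :: PySem.List.enumerate (A.drop (k+1)) ((k : Int)+1) by
        rw [List.drop_eq_getElem_cons h, PySem.List.enumerate_cons]]
    simp only [executeLoopA, PySem.List.slice_from_natCast, contains_false_coversB]
    by_cases hlen : (((A.drop k).length : Int) < ((PySem.Set.ofList A).length : Int))
    · rw [if_pos hlen]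
      have hnc : ¬ coversB A k = true := by
        intro hc
        have hle := covers_length A k hc
        have : ((A.drop k).length : Int) ≥ ((PySem.Set.ofList A).length : Int) := by
          exact_mod_cast hle
        omega
      have hfil : (List.range' k (m+1)).filter (coversB A) = [] := by
        rw [List.filter_eq_nil_iff]
        intro j hj
        have hkj : k ≤ j := (List.mem_range'_1.mp hj).1
        intro hcb
        exact hnc (coversB_mono A hkj hcb)
      rw [hfil]
      rfl
    · rw [if_neg hlen]
      by_cases hc : coversB A k = true
      · rw [hc]
        simp only [Bool.not_true, Bool.false_eq_true, if_false]
        have hsp : ((PySem.Set.ofList A).foldl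
            (fun days aseti =>
              if days < (((PySem.List.index? (A.drop k) aseti).getD 0 : Nat) : Int) then
                (((PySem.List.index? (A.drop k) aseti).getD 0 : Nat) : Int)
              else days) 0) = spreadA A k := rfl
        rw [hsp, if_lt_eq_min,
          show ((k : Int)+1) = (((k+1 : Nat)) : Int) by push_cast; ring,
          ih (k+1) (min res (spreadA A k)) (by omega),
          List.range'_succ, List.filter_cons_of_pos hc, List.map_cons,
          List.foldl_cons]
      · rw [show coversB A k = false by
            cases hx : coversB A k
            · rfl
            · exact absurd hx hc]
        simp only [Bool.not_false, if_true]
        have hfil : (List.range' k (m+1)).filter (coversB A) = [] := by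
          rw [List.filter_eq_nil_iff]
          intro j hj
          have hkj : k ≤ j := (List.mem_range'_1.mp hj).1
          intro hcb
          exact hc (coversB_mono A hkj hcb)
        rw [List.range'_succ] at hfil
        rw [List.range'_succ, hfil]
        rfl


-- ---------- B side ----------

lemma stB_fst (A : List Int) (need : Nat) (k : Nat) (h : k < A.length) :
    (stB A need k).1 =
      (stB A need (k+1)).1.insert A[k] (k : Int) := by
  rw [stB, dif_pos h]
  unfold stepB
  have hg : PySem.List.pyGetD A (k : Int) 0 = A[k] := by
    rw [PySem.List.pyGetD_natCast, List.getD_eq_getElem]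
  simp only [hg]
  split <;> rfl

lemma stB_get? (A : List Int) (need : Nat) (k : Nat) (v : Int) :
    (stB A need k).1.get? v
      = (PySem.List.index? (A.drop k) v).map (fun t => ((k + t : Nat) : Int)) := by
  induction hm : A.length - k generalizing k with
  | zero =>
    have hk : A.length ≤ k := by omega
    rw [stB, dif_neg (by omega), List.drop_eq_nil_of_le hk]
    simp [PySem.Dict.get?_empty, PySem.List.index?]
  | succ m ih =>
    have h : k < A.length := by omega
    rw [stB_fst A need k h, PySem.Dict.get?_insert,
      List.drop_eq_getElem_cons h]
    by_cases hv : v = A[k]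
    · subst hv
      rw [if_pos rfl, PySem.List.index?_cons_self]
      simp
    · rw [if_neg hv, PySem.List.index?_cons_of_ne _ (fun he => hv he.symm),
        ih (k+1) (by omega)]
      cases hidx : PySem.List.index? (A.drop (k+1)) v with
      | none => simp
      | some t =>
        simp only [Option.map_some]
        congr 1
        push_cast
        ring

lemma stB_keys_nodup (A : List Int) (need : Nat) (k : Nat) :
    (stB A need k).1.keys.Nodup := by
  induction hm : A.length - k generalizing k with
  | zero =>
    rw [stB, dif_neg (by omega)]
    exact PySem.Dict.nodup_keys_empty
  | succ m ih =>
    have h : k < A.length := by omega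
    rw [stB_fst A need k h]
    exact PySem.Dict.nodup_keys_insert _ _ _ (ih (k+1) (by omega))

lemma stB_mem_keys (A : List Int) (need : Nat) (k : Nat) (v : Int) :
    v ∈ (stB A need k).1.keys ↔ v ∈ A.drop k := by
  rw [← PySem.List.index?_isSome_iff (A.drop k) v,
    ← PySem.Dict.contains_iff_mem_keys, PySem.Dict.contains_eq_isSome_get?,
    stB_get?]
  cases PySem.List.index? (A.drop k) v <;> simp

lemma stB_size_eq_keys_length (A : List Int) (need : Nat) (k : Nat) :
    (stB A need k).1.size = (stB A need k).1.keys.length := by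
  simp [PySem.Dict.size, PySem.Dict.keys]

lemma stB_size_iff (A : List Int) (k : Nat) :
    ((stB A ((PySem.Set.ofList A).length) k).1.size = (PySem.Set.ofList A).length)
      ↔ coversB A k = true := by
  set need := (PySem.Set.ofList A).length with hneed
  have hKnd := stB_keys_nodup A need k
  have hVnd := PySem.Set.nodup_ofList A
  have hKV : (stB A need k).1.keys ⊆ PySem.Set.ofList A := by
    intro v hv
    exact (PySem.Set.mem_ofList A v).mpr
      (List.drop_subset _ _ ((stB_mem_keys A need k v).mp hv))
  rw [stB_size_eq_keys_length]
  constructor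
  · intro hlen
    have hperm := (hKnd.subperm hKV).perm_of_length_le (by omega)
    rw [coversB_iff]
    intro v hv
    exact (stB_mem_keys A need k v).mp (hperm.mem_iff.mpr hv)
  · intro hc
    have hVK : PySem.Set.ofList A ⊆ (stB A need k).1.keys := by
      intro v hv
      exact (stB_mem_keys A need k v).mpr ((coversB_iff A k).mp hc v hv)
    have h1 := (hVnd.subperm hVK).length_le
    have h2 := (hKnd.subperm hKV).length_le
    omega

lemma stB_maxval (A : List Int) (need : Nat) (k : Nat) (h : k < A.length)
    (hc : coversB A k = true) :
    (PySem.List.max? (stB A need k).1.values (fun y => y)).getD 0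
      = (k : Int) + spreadA A k := by
  have hdropk := List.drop_eq_getElem_cons h
  have hAk : A[k] ∈ A.drop k := by rw [hdropk]; exact List.mem_cons_self
  have hidxAk : idxI A k A[k] = 0 := by
    unfold idxI; rw [hdropk, PySem.List.index?_cons_self]; rfl
  have hnd := stB_keys_nodup A need k
  -- every stored value is k + (first index of its key in A.drop k)
  have hvals : (stB A need k).1.values
      = (stB A need k).1.keys.map (fun v => (k : Int) + idxI A k v) := by
    rw [PySem.Dict.values_eq_map_keys _ hnd 0]
    apply List.map_congr_left
    intro v hv
    have hmem : v ∈ A.drop k := (stB_mem_keys A need k v).mp hv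
    obtain ⟨t, ht⟩ : ∃ t, PySem.List.index? (A.drop k) v = some t := by
      have hs := (PySem.List.index?_isSome_iff (A.drop k) v).mpr hmem
      cases hx : PySem.List.index? (A.drop k) v
      · rw [hx] at hs; simp at hs
      · exact ⟨_, rfl⟩
    rw [PySem.Dict.getD_eq_get?_getD, stB_get?, ht]
    unfold idxI
    rw [ht]
    simp
  have hkmem : A[k] ∈ (stB A need k).1.keys := (stB_mem_keys A need k A[k]).mpr hAk
  have hvalsne : (stB A need k).1.values ≠ [] := by
    rw [hvals]
    intro hnil
    rw [List.map_eq_nil_iff] at hnil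
    rw [hnil] at hkmem
    simp at hkmem
  obtain ⟨m, hm⟩ : ∃ m, PySem.List.max? (stB A need k).1.values (fun y => y) = some m := by
    cases hx : PySem.List.max? (stB A need k).1.values (fun y => y)
    · exact absurd ((PySem.List.max?_eq_none_iff _ _).mp hx) hvalsne
    · exact ⟨_, rfl⟩
  rw [hm, Option.getD_some]
  have hmmem := PySem.List.max?_mem hm
  have hmmax := PySem.List.max?_isMax hm
  -- m ≤ k + spread
  have hle : m ≤ (k : Int) + spreadA A k := by
    rw [hvals] at hmmem
    obtain ⟨v0, hv0, hv0eq⟩ := List.mem_map.mp hmmem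
    have hv0V : v0 ∈ PySem.Set.ofList A :=
      (PySem.Set.mem_ofList A v0).mpr (List.drop_subset _ _ ((stB_mem_keys A need k v0).mp hv0))
    have := spreadA_le A k hv0V
    omega
  -- k + spread ≤ m
  have hge : (k : Int) + spreadA A k ≤ m := by
    rcases spreadA_cases A k with hz | ⟨v1, hv1, hv1eq⟩
    · have hkv : (k : Int) + idxI A k A[k] ∈ (stB A need k).1.values := by
        rw [hvals]; exact List.mem_map_of_mem hkmem
      have := hmmax _ hkv
      rw [hidxAk] at this
      omega
    · have hv1d : v1 ∈ A.drop k := (coversB_iff A k).mp hc v1 hv1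
      have hv1k : v1 ∈ (stB A need k).1.keys := (stB_mem_keys A need k v1).mpr hv1d
      have hkv : (k : Int) + idxI A k v1 ∈ (stB A need k).1.values := by
        rw [hvals]; exact List.mem_map_of_mem hv1k
      have := hmmax _ hkv
      omega
  omega

lemma stB_best (A : List Int) (k : Nat) :
    (stB A ((PySem.Set.ofList A).length) k).2
      = (((List.range' k (A.length - k)).filter (coversB A)).map (spreadA A)).foldl min 1000000 := by
  set need := (PySem.Set.ofList A).length with hneed
  induction hm : A.length - k generalizing k with
  | zero =>
    rw [stB, dif_neg (by omega)]
    rfl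
  | succ m ih =>
    have h : k < A.length := by omega
    have hg : PySem.List.pyGetD A (k : Int) 0 = A[k] := by
      rw [PySem.List.pyGetD_natCast, List.getD_eq_getElem]
    have hstep : stB A need k = stepB A need (stB A need (k+1)) (k : Int) := by
      rw [stB, dif_pos h]
    have hfst := stB_fst A need k h
    rw [List.range'_succ]
    have hsnd : (stB A need k).2
        = (if (stB A need k).1.size = need then
            min (stB A need (k+1)).2
              ((PySem.List.max? (stB A need k).1.values (fun y => y)).getD 0 - (k : Int))
          else (stB A need (k+1)).2) := by
      conv_lhs => rw [hstep]
      unfold stepB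
      simp only [hg, ← hfst]
      split <;> rfl
    rw [hsnd]
    by_cases hc : coversB A k = true
    · rw [if_pos ((stB_size_iff A k).mpr hc), stB_maxval A need k h hc,
        ih (k+1) (by omega), List.filter_cons_of_pos hc, List.map_cons,
        List.foldl_cons, foldl_min_min]
      congr 1
      ring
    · rw [if_neg (fun hs => hc ((stB_size_iff A k).mp hs)),
        ih (k+1) (by omega), List.filter_cons_of_neg (by simpa using hc)]

lemma foldr_stB (A : List Int) (need : Nat) (k : Nat) (hk : k ≤ A.length) :
    (PySem.List.pyRange (k : Int) (A.length : Int)).foldr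
        (fun x acc => stepB A need acc x) (PySem.Dict.empty, 1000000)
      = stB A need k := by
  induction hm : A.length - k generalizing k with
  | zero =>
    rw [PySem.List.pyRange_one_eq_nil (by omega), stB, dif_neg (by omega)]
    rfl
  | succ m ih =>
    have h : k < A.length := by omega
    rw [PySem.List.pyRange_one_cons (by exact_mod_cast h), List.foldr_cons,
      show ((k : Int) + 1) = (((k+1 : Nat)) : Int) by push_cast; ring,
      ih (k+1) (by omega) (by omega)]
    conv_rhs => rw [stB, dif_pos h]

lemma executeAlt_eq (A : List Int) :
    execute_alt A = (cands A).foldl min 1000000 + 1 := by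
  have h1 : execute_alt A
      = ((PySem.List.pyRange ((A.length : Int) - 1) (-1) (-1)).foldl
          (stepB A (PySem.Set.ofList A).length) (PySem.Dict.empty, 1000000)).2 + 1 := rfl
  rw [h1, PySem.List.pyRange_neg_one_eq_reverse,
    show ((-1 : Int) + 1) = ((0 : Nat) : Int) by norm_num,
    show ((A.length : Int) - 1 + 1) = (A.length : Int) by ring,
    List.foldl_reverse, foldr_stB A _ 0 (by omega), stB_best]
  unfold cands
  rw [List.range_eq_range']
  norm_num

-- ---------- the two special branches of A ----------

lemma exists_adjacent : ∀ (l : List Int) (a b : Int), a ∈ l → b ∈ l → a ≠ b →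
    ∃ k, ∃ _h : k + 1 < l.length, l[k] ≠ l[k+1] := by
  intro l
  induction l with
  | nil => intro a b ha _ _; simp at ha
  | cons x t ih =>
    intro a b ha hb hab
    cases t with
    | nil =>
      simp at ha hb
      exact absurd (ha.trans hb.symm) hab
    | cons y t' =>
      by_cases hxy : x = y
      · have ha' : a ∈ y :: t' := by
          rcases List.mem_cons.mp ha with h | h
          · rw [h, hxy]; exact List.mem_cons_self
          · exact h
        have hb' : b ∈ y :: t' := by
          rcases List.mem_cons.mp hb with h | h
          · rw [h, hxy]; exact List.mem_cons_self
          · exact h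
        obtain ⟨k, hk, hne⟩ := ih a b ha' hb' hab
        refine ⟨k+1, by simpa using (by omega : k + 1 + 1 < (y :: t').length + 1), ?_⟩
        simpa using hne
      · exact ⟨0, by simp only [List.length_cons]; omega, by simpa using hxy⟩

lemma cands_len1 (A : List Int) (h : (PySem.Set.ofList A).length = 1) :
    (cands A).foldl min 1000000 = 0 := by
  obtain ⟨v, hV⟩ := List.length_eq_one_iff.mp h
  have hmemv : ∀ x ∈ A, x = v := by
    intro x hx
    have hx' : x ∈ PySem.Set.ofList A := (PySem.Set.mem_ofList A x).mpr hx
    rw [hV] at hx'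
    simpa using hx'
  have hn : 0 < A.length := by
    cases A with
    | nil => rw [show PySem.Set.ofList ([] : List Int) = [] from rfl] at hV; simp at hV
    | cons _ _ => simp
  have hcov : ∀ k, k < A.length → coversB A k = true := by
    intro k hk
    rw [coversB_iff]
    intro w hw
    rw [hV] at hw
    have hw' : w = v := by simpa using hw
    have hd := List.drop_eq_getElem_cons hk
    have hAkv : A[k] = v := hmemv _ (List.getElem_mem hk)
    rw [hd, hw', ← hAkv]
    exact List.mem_cons_self
  have hsp : ∀ k, k < A.length → spreadA A k = 0 := by
    intro k hk
    have hd := List.drop_eq_getElem_cons hk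
    have hAkv : A[k] = v := hmemv _ (List.getElem_mem hk)
    have hidx : idxI A k v = 0 := by
      unfold idxI
      rw [hd, hAkv, PySem.List.index?_cons_self]
      rfl
    unfold spreadA
    rw [hV]
    simp [hidx]
  have h0 : (0 : Int) ∈ cands A := by
    unfold cands
    refine List.mem_map.mpr ⟨0, ?_, hsp 0 hn⟩
    rw [List.mem_filter]
    exact ⟨List.mem_range.mpr hn, hcov 0 hn⟩
  have hall : ∀ x ∈ cands A, x = 0 := by
    intro x hx
    rcases List.mem_map.mp hx with ⟨k, hkf, hke⟩
    rcases List.mem_filter.mp hkf with ⟨hkr, _⟩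
    rw [← hke]
    exact hsp k (List.mem_range.mp hkr)
  have hle := (PySem.List.foldl_min_le (cands A) 1000000).2 _ h0
  rcases PySem.List.foldl_min_mem (cands A) 1000000 with hm | hm
  · omega
  · have := hall _ hm; omega

lemma cands_len2 (A : List Int) (h : (PySem.Set.ofList A).length = 2) :
    (cands A).foldl min 1000000 = 1 := by
  obtain ⟨p, q, hV⟩ := List.length_eq_two.mp h
  have hnd := PySem.Set.nodup_ofList A
  rw [hV] at hnd
  have hpq : p ≠ q := by simpa using hnd
  have hmem2 : ∀ x ∈ A, x = p ∨ x = q := by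
    intro x hx
    have hx' : x ∈ PySem.Set.ofList A := (PySem.Set.mem_ofList A x).mpr hx
    rw [hV] at hx'
    simpa using hx'
  have hpA : p ∈ A := by
    have : p ∈ PySem.Set.ofList A := by rw [hV]; simp
    exact (PySem.Set.mem_ofList A p).mp this
  have hqA : q ∈ A := by
    have : q ∈ PySem.Set.ofList A := by rw [hV]; simp
    exact (PySem.Set.mem_ofList A q).mp this
  obtain ⟨k, hk1, hne⟩ := exists_adjacent A p q hpA hqA hpq
  have hk : k < A.length := by omega
  have hd1 := List.drop_eq_getElem_cons hk
  have hd2 := List.drop_eq_getElem_cons (show k+1 < A.length from hk1)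
  have hVab : ∀ w ∈ PySem.Set.ofList A, w = A[k] ∨ w = A[k+1] := by
    intro w hw
    have hw' : w = p ∨ w = q := by rw [hV] at hw; simpa using hw
    have hka : A[k] = p ∨ A[k] = q := hmem2 _ (List.getElem_mem hk)
    have hkb : A[k+1] = p ∨ A[k+1] = q := hmem2 _ (List.getElem_mem hk1)
    rcases hka with h1 | h1 <;> rcases hkb with h2 | h2 <;> rcases hw' with h3 | h3 <;> omega
  have hcovk : coversB A k = true := by
    rw [coversB_iff]
    intro w hw
    rcases hVab w hw with h1 | h1
    · rw [h1, hd1]; exact List.mem_cons_self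
    · rw [h1, hd1, hd2]; exact List.mem_cons_of_mem _ List.mem_cons_self
  have hidxb : idxI A k A[k+1] = 1 := by
    unfold idxI
    rw [hd1, PySem.List.index?_cons_of_ne _ hne, hd2, PySem.List.index?_cons_self]
    rfl
  have hidxa : idxI A k A[k] = 0 := by
    unfold idxI
    rw [hd1, PySem.List.index?_cons_self]
    rfl
  have hspk : spreadA A k = 1 := by
    have hub : spreadA A k ≤ 1 := by
      rw [spreadA_eq_foldmax]
      rcases PySem.List.foldl_max_mem ((PySem.Set.ofList A).map (idxI A k)) 0 with hm | hm
      · omega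
      · rcases List.mem_map.mp hm with ⟨w, hw, hweq⟩
        rcases hVab w hw with h1 | h1 <;> rw [h1] at hweq <;> omega
    have hbV : A[k+1] ∈ PySem.Set.ofList A :=
      (PySem.Set.mem_ofList _ _).mpr (List.getElem_mem hk1)
    have hlb := spreadA_le A k hbV
    omega
  have h1c : (1 : Int) ∈ cands A := by
    unfold cands
    refine List.mem_map.mpr ⟨k, ?_, hspk⟩
    rw [List.mem_filter]
    exact ⟨List.mem_range.mpr hk, hcovk⟩
  have hge1 : ∀ x ∈ cands A, 1 ≤ x := by
    intro x hx
    rcases List.mem_map.mp hx with ⟨j, hjf, hje⟩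
    rcases List.mem_filter.mp hjf with ⟨hjr, hcj⟩
    have hj : j < A.length := List.mem_range.mp hjr
    have hdj := List.drop_eq_getElem_cons hj
    have hwit : ∃ w ∈ PySem.Set.ofList A, w ≠ A[j] := by
      by_cases hjp : A[j] = p
      · refine ⟨q, by rw [hV]; simp, ?_⟩
        rw [hjp]
        exact fun hq => hpq hq.symm
      · exact ⟨p, by rw [hV]; simp, fun hp => hjp hp.symm⟩
    obtain ⟨w, hwV, hwne⟩ := hwit
    have hwd : w ∈ A.drop j := (coversB_iff A j).mp hcj w hwV
    have hwd' : w ∈ A.drop (j+1) := by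
      rw [hdj] at hwd
      rcases List.mem_cons.mp hwd with h1 | h1
      · exact absurd h1 hwne
      · exact h1
    have hidxw : 1 ≤ idxI A j w := by
      unfold idxI
      rw [hdj, PySem.List.index?_cons_of_ne _ (fun he => hwne he.symm)]
      obtain ⟨t, ht⟩ : ∃ t, PySem.List.index? (A.drop (j+1)) w = some t := by
        have hs := (PySem.List.index?_isSome_iff (A.drop (j+1)) w).mpr hwd'
        cases hx' : PySem.List.index? (A.drop (j+1)) w
        · rw [hx'] at hs; simp at hs
        · exact ⟨_, rfl⟩
      rw [ht]
      simp
    have := spreadA_le A j hwV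
    rw [← hje]
    omega
  have hle := (PySem.List.foldl_min_le (cands A) 1000000).2 _ h1c
  rcases PySem.List.foldl_min_mem (cands A) 1000000 with hm | hm
  · omega
  · have := hge1 _ hm; omega

lemma executeA_eq (A : List Int) :
    execute A = (cands A).foldl min 1000000 + 1 := by
  have hdef : execute A
      = (if (PySem.Set.ofList A).length = 1 then 1
         else if (PySem.Set.ofList A).length = 2 then 2
         else executeLoopA A ((PySem.Set.ofList A).length : Int) (PySem.Set.ofList A)
            (PySem.List.enumerate A 0) 1000000 + 1) := rfl
  rw [hdef]
  by_cases h1 : (PySem.Set.ofList A).length = 1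
  · rw [if_pos h1, cands_len1 A h1]
    norm_num
  · rw [if_neg h1]
    by_cases h2 : (PySem.Set.ofList A).length = 2
    · rw [if_pos h2, cands_len2 A h2]
      norm_num
    · rw [if_neg h2]
      have hl := loopA_eq A 0 1000000
      simp only [List.drop_zero, Nat.cast_zero, Nat.sub_zero] at hl
      rw [hl]
      unfold cands
      rw [List.range_eq_range']

-- ===== VERDICT (by name: the statement is the Claim_ definition above) =====
theorem execute_spec : Claim_equal_execute := by
  intro A _hdom
  unfold Spec_execute
  rw [executeA_eq, executeAlt_eq]
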